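-- pv_equiv track=rewrite | github.com/GabraxVolz1/SubliminalLearning | scripts/generate_teacher_conversations.py | enforce_numeric_only
-- ===== SOURCE A (Python) =====
-- def enforce_numeric_only(raw: str) -> str:
-- 	allowed = set("0123456789,; \n[]()")
-- 	cleaned_chars = []
-- 	for c in raw:
-- 		if c in allowed:
-- 			cleaned_chars.append(c)
-- 		else:
-- 			break
-- 	cleaned = "".join(cleaned_chars).strip()
-- 	return cleaned
-- ===== SOURCE B (Python) =====
-- import re
--
-- _PREFIX = re.compile(r'[0-9,; \n\[\]()]*')
--
-- def enforce_numeric_only(raw: str) -> str: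
--     return _PREFIX.match(raw).group().strip()
-- ===== Notes on version B (the rewrite author's own statement) =====
-- stated objective: idiomatic
-- what changed: Replaces the explicit char-by-char loop with set membership and early break by a single anchored regular expression matching the maximal leading run of allowed characters, then strip().
import Mathlib
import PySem

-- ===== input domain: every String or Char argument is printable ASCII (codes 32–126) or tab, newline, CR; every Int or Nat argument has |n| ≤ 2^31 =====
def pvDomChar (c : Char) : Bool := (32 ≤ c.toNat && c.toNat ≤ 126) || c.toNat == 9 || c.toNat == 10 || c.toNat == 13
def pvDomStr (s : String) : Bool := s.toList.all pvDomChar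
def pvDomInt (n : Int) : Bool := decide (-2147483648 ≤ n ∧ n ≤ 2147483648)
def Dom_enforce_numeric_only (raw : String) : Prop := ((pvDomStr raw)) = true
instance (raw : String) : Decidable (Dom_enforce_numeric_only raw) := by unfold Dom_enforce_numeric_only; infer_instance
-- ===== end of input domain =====

-- B replaces A's explicit char loop with early break by a single anchored regex match
-- of the maximal allowed-character prefix, then strip(); idiomatic, same behaviour.

-- ===== PORT A =====
-- allowed = set("0123456789,; \n[]()") : membership in that character set
def pvAllowedA (c : Char) : Bool := (PySem.Set.ofList "0123456789,; \n[]()".toList).contains c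

-- the for-loop with append / break, as structural recursion over the characters
def pvLoopA : List Char → List Char
  | [] => []
  | c :: cs => if pvAllowedA c then c :: pvLoopA cs else []

def enforce_numeric_only (raw : String) : String :=
  PySem.Str.strip (String.ofList (pvLoopA raw.toList))

-- ===== PORT B =====
-- the regex character class [0-9,; \n\[\]()] as a predicate (range test + literals)
def pvClassB (c : Char) : Bool :=
  ('0' ≤ c && c ≤ '9') || c == ',' || c == ';' || c == ' ' || c == '\n' ||
    c == '[' || c == ']' || c == '(' || c == ')'

-- re.match(r'[…]*', raw).group(): the maximal leading run of class characters
def enforce_numeric_only_alt (raw : String) : String :=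
  PySem.Str.strip (String.ofList (raw.toList.takeWhile pvClassB))

-- ===== PRECONDITION & SPEC =====
def Spec_enforce_numeric_only (raw : String) (out : String) : Prop := out = enforce_numeric_only_alt raw
instance (raw : String) (out : String) : Decidable (Spec_enforce_numeric_only raw out) := by unfold Spec_enforce_numeric_only; infer_instance

-- ===== CLAIM (what is proved, stated in full; the proofs are below) =====
def Claim_equal_enforce_numeric_only : Prop := ∀ (raw : String), Dom_enforce_numeric_only raw → Spec_enforce_numeric_only raw (enforce_numeric_only raw)

-- ===== LEMMAS AND PROOFS =====
theorem char_eq_iff (c d : Char) : (c = d) ↔ c.toNat = d.toNat :=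
  ⟨congrArg _, fun h => Char.ext (UInt32.toNat_inj.mp h)⟩

theorem char_le_iff (c d : Char) : (c ≤ d) ↔ c.toNat ≤ d.toNat := by
  rw [Char.le_def, UInt32.le_iff_toNat_le]; rfl

-- the two character tests agree: set membership = regex character class
theorem pvAllowed_eq (c : Char) : pvAllowedA c = pvClassB c := by
  have hl : "0123456789,; \n[]()".toList
      = ['0','1','2','3','4','5','6','7','8','9',',',';',' ','\n','[',']','(',')'] := by decide
  rw [Bool.eq_iff_iff]
  unfold pvAllowedA pvClassB
  rw [hl]
  simp only [PySem.Set.contains, Bool.or_eq_true, Bool.and_eq_true,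
    decide_eq_true_eq, beq_iff_eq, List.contains_iff_mem, PySem.Set.mem_ofList]
  simp only [List.mem_cons, List.not_mem_nil, or_false, char_eq_iff, char_le_iff,
    show ('0').toNat = 48 from rfl, show ('1').toNat = 49 from rfl,
    show ('2').toNat = 50 from rfl, show ('3').toNat = 51 from rfl,
    show ('4').toNat = 52 from rfl, show ('5').toNat = 53 from rfl,
    show ('6').toNat = 54 from rfl, show ('7').toNat = 55 from rfl,
    show ('8').toNat = 56 from rfl, show ('9').toNat = 57 from rfl,
    show (',').toNat = 44 from rfl, show (';').toNat = 59 from rfl,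
    show (' ').toNat = 32 from rfl, show ('\n').toNat = 10 from rfl,
    show ('[').toNat = 91 from rfl, show (']').toNat = 93 from rfl,
    show ('(').toNat = 40 from rfl, show (')').toNat = 41 from rfl]
  omega

-- A's break-on-first-disallowed loop collects exactly the longest allowed prefix
theorem pvLoop_eq_takeWhile (cs : List Char) : pvLoopA cs = cs.takeWhile pvClassB := by
  induction cs with
  | nil => rfl
  | cons c cs ih =>
    rw [pvLoopA, pvAllowed_eq c, List.takeWhile, ih]
    cases pvClassB c <;> rfl

-- ===== VERDICT (by name: the statement is the Claim_ definition above) =====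
theorem enforce_numeric_only_spec : Claim_equal_enforce_numeric_only := by
  intro raw _
  unfold Spec_enforce_numeric_only enforce_numeric_only enforce_numeric_only_alt
  rw [pvLoop_eq_takeWhile]
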